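-- pv_equiv track=rewrite | github.com/NoahWind/ProgrammingChallenges | Least Common Multiple.py | get_largest_occurense
-- ===== SOURCE A (Python) =====
-- def get_largest_occurense(b_prime):
--     max_counts = {}
--     current_count = 1
--
--     for i in range(1, len(b_prime)):
--         if b_prime[i] == b_prime[i - 1]:
--             current_count += 1
--         else:
--             num = b_prime[i - 1]
--             max_counts[num] = max(max_counts.get(num, 0), current_count)
--             current_count = 1
--
--     num = b_prime[-1]
--     max_counts[num] = max(max_counts.get(num, 0), current_count)
--
--     new_b_prime = []
--
--     for i in max_counts:
--         new_b_prime.extend([i] * max_counts[i])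
--
--     return new_b_prime
-- ===== SOURCE B (Python) =====
-- def _best_streak(idxs):
--     prev = idxs[0]
--     best = run = 1
--     for cur in idxs[1:]:
--         run = run + 1 if cur == prev + 1 else 1
--         best = max(best, run)
--         prev = cur
--     return best
--
--
-- def get_largest_occurense(b_prime):
--     positions = {}
--     for idx, v in enumerate(b_prime):
--         positions[v] = positions.get(v, []) + [idx]
--     new_b_prime = []
--     for v, idxs in positions.items():
--         new_b_prime.extend([v] * _best_streak(idxs))
--     return new_b_prime
-- ===== Notes on version B (the rewrite author's own statement) =====
-- stated objective: alternative
-- what changed: B inverts the computation: instead of A's left-to-right run-length scan with an interleaved dict of maxima and a trailing flush, B first builds an index list per value (value -> all positions), then computes each value's longest run as the longest streak of consecutive integers in its index list, and expands in dict order.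
import Mathlib
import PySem

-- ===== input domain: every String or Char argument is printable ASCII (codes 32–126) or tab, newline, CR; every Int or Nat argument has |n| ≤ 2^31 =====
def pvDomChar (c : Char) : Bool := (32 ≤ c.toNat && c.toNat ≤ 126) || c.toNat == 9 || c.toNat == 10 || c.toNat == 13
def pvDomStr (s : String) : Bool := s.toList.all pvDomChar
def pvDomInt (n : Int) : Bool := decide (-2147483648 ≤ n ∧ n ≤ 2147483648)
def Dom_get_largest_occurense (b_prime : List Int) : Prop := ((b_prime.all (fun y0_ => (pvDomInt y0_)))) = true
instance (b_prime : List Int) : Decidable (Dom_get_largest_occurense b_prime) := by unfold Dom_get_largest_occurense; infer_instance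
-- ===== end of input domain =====

-- B inverts the computation: it first indexes every value's positions, then takes each value's longest
-- streak of consecutive indices, instead of A's run-length scan with an interleaved max-dict ('alternative').
-- Equivalence is about the return value.

-- ===== PORT A =====
-- the body of A's 'for i in range(1, len(b_prime))' loop; state = (max_counts, current_count)
def pvStepA (b : List Int) (st : PySem.Dict Int Int × Int) (i : Int) : PySem.Dict Int Int × Int :=
  if PySem.List.pyGetD b i 0 == PySem.List.pyGetD b (i - 1) 0 then
    (st.1, st.2 + 1)
  else
    (st.1.insert (PySem.List.pyGetD b (i - 1) 0)
       (max (st.1.getD (PySem.List.pyGetD b (i - 1) 0) 0) st.2), 1)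

def get_largest_occurense (b_prime : List Int) : List Int :=
  let st := (PySem.List.pyRange 1 (b_prime.length : Int) 1).foldl (pvStepA b_prime)
              (PySem.Dict.empty, 1)
  -- b_prime[-1]: IndexError on [], excluded by Pre_; pyGetD is exact on nonempty lists
  let num := PySem.List.pyGetD b_prime (-1) 0
  let mc := st.1.insert num (max (st.1.getD num 0) st.2)
  mc.items.foldl (fun acc kv => acc ++ List.replicate kv.2.toNat kv.1) []

-- ===== PORT B =====
-- Source B's helper _best_streak: state (prev, best, run), folded over idxs[1:]
def pvSStep (st : Int × Int × Int) (cur : Int) : Int × Int × Int :=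
  let run := if cur == st.1 + 1 then st.2.2 + 1 else 1
  (cur, max st.2.1 run, run)

def pvBestStreak (idxs : List Int) : Int :=
  match idxs with
  | [] => 1          -- unreachable: position lists are never empty (idxs[0] would raise)
  | i :: is => (is.foldl pvSStep (i, 1, 1)).2.1

def get_largest_occurense_alt (b_prime : List Int) : List Int :=
  let positions := (PySem.List.enumerate b_prime).foldl
      (fun p iv => p.insert iv.2 (p.getD iv.2 [] ++ [iv.1])) PySem.Dict.empty
  positions.items.foldl
      (fun acc kv => acc ++ List.replicate (pvBestStreak kv.2).toNat kv.1) []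

-- ===== PRECONDITION & SPEC =====
-- Pre_ excludes exactly the empty list, on which A raises IndexError at 'b_prime[-1]' (B returns [] there).
def Pre_get_largest_occurense (b_prime : List Int) : Prop := b_prime ≠ []
instance (b_prime : List Int) : Decidable (Pre_get_largest_occurense b_prime) := by
  unfold Pre_get_largest_occurense; infer_instance
def pvWitness_get_largest_occurense : List Int := [2, 2, 5]

def Spec_get_largest_occurense (b_prime : List Int) (out : List Int) : Prop :=
  out = get_largest_occurense_alt b_prime
instance (b_prime : List Int) (out : List Int) : Decidable (Spec_get_largest_occurense b_prime out) := by
  unfold Spec_get_largest_occurense; infer_instance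

-- ===== CLAIM (what is proved, stated in full; the proofs are below) =====
def Claim_equal_get_largest_occurense : Prop := ∀ (b_prime : List Int), Dom_get_largest_occurense b_prime → Pre_get_largest_occurense b_prime → Spec_get_largest_occurense b_prime (get_largest_occurense b_prime)

-- ===== LEMMAS AND PROOFS =====

-- A's scan, rephrased as structural recursion on the tail: 'prev' is b[i-1], 'c' the current run count;
-- the base case is A's trailing flush 'max_counts[b[-1]] = max(...)'.
def pvScanA (prev : Int) (c : Int) (d : PySem.Dict Int Int) : List Int → PySem.Dict Int Int
  | [] => d.insert prev (max (d.getD prev 0) c)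
  | y :: ys =>
      if y == prev then pvScanA prev (c + 1) d ys
      else pvScanA y 1 (d.insert prev (max (d.getD prev 0) c)) ys

-- A's final 'max_counts[b_prime[-1]] = max(...)' applied to the loop's final state
def pvFinish (b : List Int) (st : PySem.Dict Int Int × Int) : PySem.Dict Int Int :=
  st.1.insert (PySem.List.pyGetD b (-1) 0)
    (max (st.1.getD (PySem.List.pyGetD b (-1) 0) 0) st.2)

-- run-by-run reference: fold 'insert max' over the maximal runs of the list
def pvAltLoop (d : PySem.Dict Int Int) : List Int → PySem.Dict Int Int
  | [] => d
  | v :: rest =>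
      pvAltLoop (d.insert v (max (d.getD v 0) (1 + ((rest.takeWhile (· == v)).length : Int))))
        (rest.dropWhile (· == v))
  termination_by l => l.length
  decreasing_by
    simp only [List.length_cons]
    exact Nat.lt_succ_of_le (List.length_dropWhile_le _ _)

lemma pvL1 (b : List Int) (hb : b ≠ []) (m : Nat) :
    ∀ (k : Nat) (hk : k + m + 1 = b.length) (d : PySem.Dict Int Int) (c : Int),
      pvFinish b (((PySem.List.pyRange ((k : Int) + 1) (b.length : Int) 1).foldl (pvStepA b) (d, c)))
      = pvScanA (b[k]'(by omega)) c d (b.drop (k + 1)) := by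
  induction m with
  | zero =>
      intro k hk d c
      have hrange : PySem.List.pyRange ((k : Int) + 1) (b.length : Int) 1 = [] :=
        PySem.List.pyRange_one_eq_nil (by omega)
      have hdrop : b.drop (k + 1) = [] := List.drop_eq_nil_of_le (by omega)
      have hlast : PySem.List.pyGetD b (-1) 0 = b[k]'(by omega) := by
        rw [PySem.List.pyGetD_neg_one b 0 hb, List.getLast_eq_getElem]
        congr 1; omega
      rw [hrange, hdrop]
      simp only [List.foldl_nil, pvScanA, pvFinish, hlast]
  | succ m ih =>
      intro k hk d c
      have hkk : k + 1 < b.length := by omega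
      have hk0 : k < b.length := by omega
      have e1 : PySem.List.pyGetD b ((k : Int) + 1) 0 = b[k + 1]'hkk := by
        have h : ((k : Int) + 1) = ((k + 1 : Nat) : Int) := by push_cast; ring
        rw [h, PySem.List.pyGetD_natCast, List.getD_eq_getElem _ _ hkk]
      have e0 : PySem.List.pyGetD b ((k : Int) + 1 - 1) 0 = b[k]'hk0 := by
        have h : ((k : Int) + 1 - 1) = ((k : Nat) : Int) := by ring
        rw [h, PySem.List.pyGetD_natCast, List.getD_eq_getElem _ _ hk0]
      have hdrop : b.drop (k + 1) = b[k + 1]'hkk :: b.drop (k + 2) :=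
        List.drop_eq_getElem_cons hkk
      have hcast : ((k : Int) + 1) + 1 = ((k + 1 : Nat) : Int) + 1 := by push_cast; ring
      rw [PySem.List.pyRange_one_cons (by omega)]
      simp only [List.foldl_cons, pvStepA, e1, e0, hdrop, pvScanA]
      by_cases hbe : b[k + 1]'hkk = b[k]'hk0
      · simp only [hbe, beq_self_eq_true, if_true, hcast]
        rw [ih (k + 1) (by omega) d (c + 1)]
        simp only [hbe]
      · have hne : (b[k + 1]'hkk == b[k]'hk0) = false := by
          simpa using hbe
        simp only [hne, Bool.false_eq_true, if_false, hcast]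
        rw [ih (k + 1) (by omega) _ 1]

lemma pvL3 (ys : List Int) :
    ∀ (x c : Int) (d : PySem.Dict Int Int),
      pvScanA x c d ys
      = pvAltLoop (d.insert x (max (d.getD x 0) (c + ((ys.takeWhile (· == x)).length : Int))))
          (ys.dropWhile (· == x)) := by
  induction ys with
  | nil =>
      intro x c d
      simp [pvScanA, pvAltLoop]
  | cons y t ih =>
      intro x c d
      by_cases h : y = x
      · subst h
        simp only [pvScanA, beq_self_eq_true, if_true, List.takeWhile_cons,
          List.dropWhile_cons, List.length_cons]
        rw [ih]
        have harith : (c + 1) + ((t.takeWhile (· == y)).length : Int)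
            = c + (((t.takeWhile (· == y)).length + 1 : Nat) : Int) := by push_cast; ring
        rw [harith]
      · have hne : (y == x) = false := by simpa using h
        simp only [pvScanA, hne, Bool.false_eq_true, if_false, List.takeWhile_cons,
          List.dropWhile_cons]
        rw [ih]
        conv_rhs => rw [pvAltLoop]
        norm_num

-- ---- B-side machinery: consecutive index blocks and the streak fold ----

-- blk s n = [s, s+1, …, s+n-1]
def pvBlk (s : Int) : Nat → List Int
  | 0 => []
  | n + 1 => s :: pvBlk (s + 1) n

lemma pvBlk_ne_nil (s : Int) (n : Nat) (h : 1 ≤ n) : pvBlk s n ≠ [] := by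
  cases n with
  | zero => omega
  | succ n => simp [pvBlk]

lemma pvBlk_succ_right (n : Nat) : ∀ s, pvBlk s (n + 1) = pvBlk s n ++ [s + n] := by
  induction n with
  | zero => intro s; simp [pvBlk]
  | succ n ih =>
      intro s
      show s :: pvBlk (s + 1) (n + 1) = (s :: pvBlk (s + 1) n) ++ [s + ↑(n+1)]
      rw [ih (s + 1)]
      simp only [List.cons_append, List.cons.injEq, true_and, List.append_cancel_left_eq,
        List.cons.injEq, and_true]
      push_cast; ring_nf

lemma pvGetLastD_append_blk (l : List Int) (s : Int) (n : Nat) (h : 1 ≤ n) (d : Int) :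
    (l ++ pvBlk s n).getLastD d = s + n - 1 := by
  obtain ⟨m, rfl⟩ : ∃ m, n = m + 1 := ⟨n - 1, by omega⟩
  rw [pvBlk_succ_right, ← List.append_assoc]
  simp
  omega

-- closed form of the streak fold along a consecutive block continuing at prev+1
lemma pvC (n : Nat) : ∀ (prev best run : Int), run ≤ best →
    (pvBlk (prev + 1) n).foldl pvSStep (prev, best, run)
      = (prev + n, max best (run + n), run + n) := by
  induction n with
  | zero =>
      intro prev best run hrb
      simp [pvBlk, max_eq_left hrb]
  | succ n ih =>
      intro prev best run hrb
      show ((pvBlk (prev + 1 + 1) n).foldl pvSStep (pvSStep (prev, best, run) (prev + 1)))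
          = _
      have hstep : pvSStep (prev, best, run) (prev + 1) = (prev + 1, max best (run + 1), run + 1) := by
        simp [pvSStep]
      rw [hstep, ih (prev + 1) (max best (run + 1)) (run + 1) (le_max_right _ _)]
      have h1 : prev + 1 + (n : Int) = prev + ((n : Nat) + 1 : Nat) := by push_cast; ring
      have h2 : max (max best (run + 1)) (run + 1 + n) = max best (run + ((n : Nat) + 1 : Nat)) := by
        push_cast; omega
      have h3 : run + 1 + (n : Int) = run + ((n : Nat) + 1 : Nat) := by push_cast; ring
      rw [h1, h2, h3]

-- closed form when the block does NOT continue the previous index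
lemma pvD (n : Nat) (hn : 1 ≤ n) (s prev best run : Int) (hne : s ≠ prev + 1)
    (_hrb : run ≤ best) (hb1 : 1 ≤ best) :
    (pvBlk s n).foldl pvSStep (prev, best, run) = (s + n - 1, max best n, (n : Int)) := by
  obtain ⟨m, rfl⟩ : ∃ m, n = m + 1 := ⟨n - 1, by omega⟩
  show ((pvBlk (s + 1) m).foldl pvSStep (pvSStep (prev, best, run) s)) = _
  have hstep : pvSStep (prev, best, run) s = (s, best, 1) := by
    have : (s == prev + 1) = false := by simpa using hne
    simp [pvSStep, this, max_eq_left hb1]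
  rw [hstep, pvC m s best 1 hb1]
  have h1 : s + (m : Int) = s + ((m : Nat) + 1 : Nat) - 1 := by push_cast; ring
  have h2 : (1 : Int) + m = ((m : Nat) + 1 : Nat) := by push_cast; ring
  rw [h1, h2]

-- the fold keeps run ≤ best, 1 ≤ best, and tracks the last element
lemma pvSfoldProps (l : List Int) : ∀ (prev best run : Int), run ≤ best → 1 ≤ best →
    (l.foldl pvSStep (prev, best, run)).2.2 ≤ (l.foldl pvSStep (prev, best, run)).2.1
    ∧ 1 ≤ (l.foldl pvSStep (prev, best, run)).2.1
    ∧ (l.foldl pvSStep (prev, best, run)).1 = l.getLastD prev := by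
  induction l with
  | nil => intro prev best run h1 h2; exact ⟨h1, h2, rfl⟩
  | cons c t ih =>
      intro prev best run h1 h2
      have hstep : pvSStep (prev, best, run) c
          = (c, max best (if c == prev + 1 then run + 1 else 1),
             if c == prev + 1 then run + 1 else 1) := by
        rfl
      simp only [List.foldl_cons, hstep, List.getLastD_cons]
      exact ih c _ _ (le_max_right _ _) (le_trans h2 (le_max_left _ _))

lemma pvStreakBlk (s : Int) (n : Nat) (hn : 1 ≤ n) : pvBestStreak (pvBlk s n) = n := by
  obtain ⟨m, rfl⟩ : ∃ m, n = m + 1 := ⟨n - 1, by omega⟩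
  show ((pvBlk (s + 1) m).foldl pvSStep (s, 1, 1)).2.1 = _
  rw [pvC m s 1 1 le_rfl]
  push_cast; omega

-- appending a non-adjacent consecutive block takes the max with the block's length
lemma pvStreakAppend (idxs : List Int) (hne : idxs ≠ []) (s : Int) (n : Nat) (hn : 1 ≤ n)
    (hgap : idxs.getLastD 0 + 1 < s) :
    pvBestStreak (idxs ++ pvBlk s n) = max (pvBestStreak idxs) n := by
  obtain ⟨i, is, rfl⟩ : ∃ i is, idxs = i :: is := by
    cases idxs with
    | nil => exact absurd rfl hne
    | cons i is => exact ⟨i, is, rfl⟩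
  show ((is ++ pvBlk s n).foldl pvSStep (i, 1, 1)).2.1 = _
  rw [List.foldl_append]
  obtain ⟨h1, h2, h3⟩ := pvSfoldProps is i 1 1 le_rfl le_rfl
  rcases hfold : is.foldl pvSStep (i, (1 : Int), (1 : Int)) with ⟨p, b, r⟩
  rw [hfold] at h1 h2 h3
  have hB : pvBestStreak (i :: is) = b := by simp only [pvBestStreak, hfold]
  have hlast : (i :: is).getLastD 0 = p := by rw [List.getLastD_cons]; exact h3.symm
  have hsne : s ≠ p + 1 := by omega
  rw [pvD n hn s p b r hsne h1 h2, hB]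

-- ---- positions dict as structural recursion over the list with an index ----

def pvPosFold : PySem.Dict Int (List Int) → Int → List Int → PySem.Dict Int (List Int)
  | p, _, [] => p
  | p, k, x :: xs => pvPosFold (p.insert x (p.getD x [] ++ [k])) (k + 1) xs

lemma pvPosFold_eq_enum (b : List Int) : ∀ (p : PySem.Dict Int (List Int)) (k : Int),
    (PySem.List.enumerate b k).foldl (fun p iv => p.insert iv.2 (p.getD iv.2 [] ++ [iv.1])) p
      = pvPosFold p k b := by
  induction b with
  | nil => intro p k; rfl
  | cons x xs ih =>
      intro p k
      rw [PySem.List.enumerate_cons, List.foldl_cons]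
      exact ih _ (k + 1)

lemma pvPosFold_append (xs : List Int) : ∀ (p : PySem.Dict Int (List Int)) (k : Int) (ys : List Int),
    pvPosFold p k (xs ++ ys) = pvPosFold (pvPosFold p k xs) (k + xs.length) ys := by
  induction xs with
  | nil => intro p k ys; simp [pvPosFold]
  | cons x t ih =>
      intro p k ys
      show pvPosFold (p.insert x (p.getD x [] ++ [k])) (k + 1) (t ++ ys) = _
      rw [ih]
      congr 1
      simp only [List.length_cons]
      push_cast; ring

lemma pvPosFold_replicate (n : Nat) : ∀ (p : PySem.Dict Int (List Int)) (k v : Int), 1 ≤ n →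
    pvPosFold p k (List.replicate n v) = p.insert v (p.getD v [] ++ pvBlk k n) := by
  induction n with
  | zero => intro _ _ _ h; omega
  | succ n ih =>
      intro p k v _
      cases n with
      | zero => simp [pvPosFold, pvBlk]
      | succ m =>
          show pvPosFold (p.insert v (p.getD v [] ++ [k])) (k + 1) (List.replicate (m + 1) v) = _
          rw [ih _ (k + 1) v (by omega)]
          rw [PySem.Dict.insert_insert_self, PySem.Dict.getD_insert_self]
          simp [pvBlk, List.append_assoc]

-- a maximal-run decomposition of a nonempty list
lemma pvRunDecomp (v : Int) (t : List Int) :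
    v :: t = List.replicate (1 + (t.takeWhile (· == v)).length) v ++ t.dropWhile (· == v) := by
  have h1 : t.takeWhile (· == v) = List.replicate (t.takeWhile (· == v)).length v := by
    apply List.eq_replicate_of_mem
    intro b hb
    have := List.mem_takeWhile_imp hb
    simpa using this
  calc v :: t = v :: (t.takeWhile (· == v) ++ t.dropWhile (· == v)) := by
        rw [List.takeWhile_append_dropWhile]
    _ = _ := by
        rw [show 1 + (t.takeWhile (· == v)).length = (t.takeWhile (· == v)).length + 1 by omega]
        rw [List.replicate_succ]
        simp only [List.cons_append, List.cons.injEq, true_and]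
        rw [← h1]

-- the grand invariant: the max-count dict is the streak-image of the positions dict
lemma pvGrand (N : Nat) : ∀ (b : List Int), b.length ≤ N →
    ∀ (p : PySem.Dict Int (List Int)) (m : PySem.Dict Int Int) (k : Int),
      p.keys.Nodup →
      m.items = p.items.map (fun q => (q.1, pvBestStreak q.2)) →
      (∀ q ∈ p.items, q.2 ≠ [] ∧ q.2.getLastD 0 < k ∧ (b.head? = some q.1 → q.2.getLastD 0 + 1 < k)) →
      (pvAltLoop m b).items = (pvPosFold p k b).items.map (fun q => (q.1, pvBestStreak q.2)) := by
  induction N with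
  | zero =>
      intro b hb p m k _ hmap _
      have : b = [] := List.eq_nil_of_length_eq_zero (Nat.le_zero.mp hb)
      subst this
      simpa [pvAltLoop, pvPosFold] using hmap
  | succ N ih =>
      intro b hb p m k hnd hmap hinv
      cases b with
      | nil => simpa [pvAltLoop, pvPosFold] using hmap
      | cons v t =>
          have hkeys : m.keys = p.keys := by
            simp only [PySem.Dict.keys, hmap, List.map_map]
            rfl
          have hn1 : 1 ≤ 1 + (t.takeWhile (· == v)).length := by omega
          have hsplit : v :: t
              = List.replicate (1 + (t.takeWhile (· == v)).length) v ++ t.dropWhile (· == v) :=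
            pvRunDecomp v t
          have hlrest : (t.dropWhile (· == v)).length ≤ N := by
            have h1 := List.length_dropWhile_le (· == v) t
            have h2 : t.length + 1 ≤ N + 1 := by simpa using hb
            omega
          -- unfold one step of both sides
          conv_lhs => rw [pvAltLoop]
          conv_rhs =>
            rw [hsplit, pvPosFold_append,
              pvPosFold_replicate (1 + (t.takeWhile (· == v)).length) p k v hn1]
          rw [List.length_replicate]
          set L := (t.takeWhile (· == v)).length with hL
          set rest := t.dropWhile (· == v) with hrest
          set n := 1 + L with hn
          set newp := p.getD v [] ++ pvBlk k n with hnewp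
          -- head of rest (if any) differs from v
          have hresthead : ∀ h : Int, rest.head? = some h → h ≠ v := by
            intro h hh he
            obtain ⟨rs, hr⟩ := List.head?_eq_some_iff.mp hh
            have hdw : t.dropWhile (· == v) = h :: rs := hrest.symm.trans hr
            have hfalse := List.head_dropWhile_not (fun x => x == v) (l := t)
              (w := by rw [hdw]; simp)
            simp only [hdw, List.head_cons] at hfalse
            rw [he] at hfalse
            simp at hfalse
          -- the inserted value on the m side equals the streak of the inserted list
          have hvaleq : max (m.getD v 0) (1 + (L : Int)) = pvBestStreak newp := by
            by_cases hc : p.contains v = true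
            · have hsome : (p.get? v).isSome := by
                rw [PySem.Dict.contains_eq_isSome_get?] at hc; exact hc
              obtain ⟨val, hval⟩ := Option.isSome_iff_exists.mp hsome
              have hmem : (v, val) ∈ p.items := PySem.Dict.mem_items_of_get?_eq_some p hval
              have hgDp : p.getD v [] = val := PySem.Dict.getD_of_get?_eq_some p [] hval
              have hndm : m.keys.Nodup := by rw [hkeys]; exact hnd
              have hmm : (v, pvBestStreak val) ∈ m.items := by
                rw [hmap]
                exact List.mem_map.mpr ⟨(v, val), hmem, rfl⟩
              have hgDm : m.getD v 0 = pvBestStreak val :=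
                PySem.Dict.getD_of_mem_items m hmm hndm 0
              obtain ⟨hvne, _, hgap⟩ := hinv (v, val) hmem
              have hgap' : val.getLastD 0 + 1 < k := hgap (by simp)
              rw [hnewp, hgDp,
                pvStreakAppend val hvne k n hn1 hgap', hgDm]
              congr 1
            · have hcm : m.contains v = false := by
                rw [PySem.Dict.contains_eq_decide_mem_keys, hkeys,
                  ← PySem.Dict.contains_eq_decide_mem_keys]
                simpa using hc
              have hgDp : p.getD v [] = [] :=
                PySem.Dict.getD_of_not_contains p [] (by simpa using hc)
              have hgDm : m.getD v 0 = 0 :=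
                PySem.Dict.getD_of_not_contains m 0 hcm
              rw [hnewp, hgDp, List.nil_append, pvStreakBlk k n hn1, hgDm, hn]
              push_cast; omega
          -- apply the induction hypothesis to the rest
          rw [ih rest hlrest (p.insert v newp)
                (m.insert v (max (m.getD v 0) (1 + (L : Int)))) (k + n)
                (PySem.Dict.nodup_keys_insert p v newp hnd) ?hmap' ?hinv']
          case hmap' =>
            have hcontains : m.contains v = p.contains v := by
              rw [PySem.Dict.contains_eq_decide_mem_keys, hkeys,
                ← PySem.Dict.contains_eq_decide_mem_keys]
            by_cases hc : p.contains v = true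
            · rw [PySem.Dict.items_insert_of_contains m _ (by rw [hcontains]; exact hc),
                PySem.Dict.items_insert_of_contains p _ hc, hmap, List.map_map, List.map_map]
              apply List.map_congr_left
              intro q hq
              by_cases hqv : q.1 = v
              · simp only [Function.comp_apply, hqv, beq_self_eq_true, if_true, hvaleq]
              · have : (q.1 == v) = false := by simpa using hqv
                simp only [Function.comp_apply, this, Bool.false_eq_true, if_false]
            · rw [PySem.Dict.items_insert_of_not_contains m _ (by rw [hcontains]; simpa using hc),
                PySem.Dict.items_insert_of_not_contains p _ (by simpa using hc), hmap,
                List.map_append, hvaleq]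
              rfl
          case hinv' =>
            intro q hq
            rcases (PySem.Dict.mem_items_insert p v newp q).mp hq with hq1 | ⟨hq2, hq3⟩
            · subst hq1
              refine ⟨?_, ?_, ?_⟩
              · simp only
                intro hcontra
                exact pvBlk_ne_nil k n hn1 (List.append_eq_nil_iff.mp hcontra).2
              · simp only [hnewp, pvGetLastD_append_blk _ k n hn1]
                omega
              · intro hh
                exact absurd rfl (hresthead v hh)
            · obtain ⟨hvne, hlt, _⟩ := hinv q hq2
              refine ⟨hvne, by omega, ?_⟩
              intro _
              have : (1 : Int) ≤ (n : Int) := by exact_mod_cast hn1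
              omega

-- ===== VERDICT (by name: the statement is the Claim_ definition above) =====
theorem get_largest_occurense_spec : Claim_equal_get_largest_occurense := by
  intro b _ hpre
  unfold Spec_get_largest_occurense
  match b, hpre with
  | x :: xs, _ =>
    show get_largest_occurense (x :: xs) = get_largest_occurense_alt (x :: xs)
    unfold get_largest_occurense get_largest_occurense_alt
    rw [pvPosFold_eq_enum (x :: xs) PySem.Dict.empty 0]
    have hdict : pvFinish (x :: xs)
        (((PySem.List.pyRange 1 ((x :: xs).length : Int) 1).foldl (pvStepA (x :: xs))
          (PySem.Dict.empty, 1)))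
        = pvAltLoop PySem.Dict.empty (x :: xs) := by
      have h1 := pvL1 (x :: xs) (by simp) xs.length 0 (by simp) PySem.Dict.empty 1
      have h3 := pvL3 xs x 1 PySem.Dict.empty
      simp only [Nat.cast_zero, zero_add] at h1
      conv_rhs => rw [pvAltLoop]
      rw [show ((x :: xs)[0]'(by simp) = x) from rfl] at h1
      rw [show (x :: xs).drop 1 = xs from rfl] at h1
      exact h1.trans h3
    have hg := pvGrand (x :: xs).length (x :: xs) le_rfl PySem.Dict.empty PySem.Dict.empty 0
      (by simp [PySem.Dict.keys, PySem.Dict.empty]) rfl (by intro q hq; simp [PySem.Dict.empty] at hq)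
    show (pvFinish (x :: xs) _).items.foldl _ [] = _
    rw [hdict, hg, List.foldl_map]
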